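-- pv_equiv track=rewrite | github.com/dvidbruhm/advent-of-code-2025 | day2.py | is_invalid_part2
-- ===== SOURCE A (Python) =====
-- num_map = {
--     2: [1],
--     3: [1],
--     4: [1, 2],
--     5: [1],
--     6: [1, 2, 3],
--     7: [1],
--     8: [1, 2, 4],
--     9: [1, 3],
--     10: [1, 2, 5],
-- }
--
-- def is_invalid_part2(id: str):
--     id_len = len(id)
--     if id_len == 1:
--         return False
--     ms = num_map[id_len]
--     invalid = False
--     for m in ms:
--         for i in range(0, id_len - m, m):
--             if id[i : i + m] != id[i + m : (i + m * 2)]: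
--                 break
--         else:
--             invalid = True
--             return invalid
--
--     return invalid
-- ===== SOURCE B (Python) =====
-- def is_invalid_part2(id: str):
--     # rotation trick: a string is a repetition of a shorter block
--     # exactly when it occurs inside its own doubling with both ends trimmed
--     return id in (id + id)[1:-1]
-- ===== Notes on version B (the rewrite author's own statement) =====
-- stated objective: idiomatic
-- what changed: Replaced the divisor-table lookup with its nested block-comparison loops by the classic rotation trick: id is block-periodic iff it occurs in (id+id)[1:-1].
import Mathlib
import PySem

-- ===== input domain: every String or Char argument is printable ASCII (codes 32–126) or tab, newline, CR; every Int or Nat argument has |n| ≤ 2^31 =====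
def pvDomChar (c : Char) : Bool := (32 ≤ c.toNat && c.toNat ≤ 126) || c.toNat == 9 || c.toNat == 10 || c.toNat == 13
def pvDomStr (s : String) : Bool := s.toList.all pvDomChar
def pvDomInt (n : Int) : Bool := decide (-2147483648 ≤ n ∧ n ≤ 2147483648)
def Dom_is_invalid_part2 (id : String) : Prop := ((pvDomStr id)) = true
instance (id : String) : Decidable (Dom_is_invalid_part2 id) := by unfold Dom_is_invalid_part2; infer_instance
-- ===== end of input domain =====

-- B replaces A's divisor table and nested block-comparison loops by the idiomatic
-- rotation trick `id in (id + id)[1:-1]`; equivalence is proved on lengths 1..10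
-- (outside that range A raises KeyError, see Pre_ below).

-- ===== PORT A =====
def num_map : PySem.Dict Int (List Int) :=
  PySem.Dict.ofList [(2,[1]),(3,[1]),(4,[1,2]),(5,[1]),(6,[1,2,3]),(7,[1]),(8,[1,2,4]),(9,[1,3]),(10,[1,2,5])]

-- the inner for-loop with break/else is the `all` over the same range with the same
-- slice comparison; the outer for-loop with early `return True` is the `any` over ms
def is_invalid_part2 (id : String) : Bool :=
  let l := id.toList
  let id_len : Int := l.length
  if id_len == 1 then false
  else
    match num_map.get? id_len with
    | none => false   -- Python raises KeyError here; excluded by Pre_is_invalid_part2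
    | some ms =>
      ms.any (fun m =>
        (PySem.List.pyRange 0 (id_len - m) m).all (fun i =>
          PySem.List.slice l (some i) (some (i + m)) ==
          PySem.List.slice l (some (i + m)) (some (i + m * 2))))

-- ===== PORT B =====
def is_invalid_part2_alt (id : String) : Bool :=
  let l := id.toList
  PySem.Chars.isIn l (PySem.Chars.slice (l ++ l) (some 1) (some (-1)))

-- ===== PRECONDITION & SPEC =====
-- A raises KeyError (num_map lookup) whenever len(id) is 0 or greater than 10.
def Pre_is_invalid_part2 (id : String) : Prop :=
  1 ≤ id.toList.length ∧ id.toList.length ≤ 10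
instance (id : String) : Decidable (Pre_is_invalid_part2 id) := by
  unfold Pre_is_invalid_part2; infer_instance

def pvWitness_is_invalid_part2 : String := "abab"

def Spec_is_invalid_part2 (id : String) (out : Bool) : Prop := out = is_invalid_part2_alt id
instance (id : String) (out : Bool) : Decidable (Spec_is_invalid_part2 id out) := by unfold Spec_is_invalid_part2; infer_instance

-- ===== CLAIM (what is proved, stated in full; the proofs are below) =====
def Claim_equal_is_invalid_part2 : Prop := ∀ (id : String), Dom_is_invalid_part2 id → Pre_is_invalid_part2 id → Spec_is_invalid_part2 id (is_invalid_part2 id)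


-- ===== LEMMAS AND PROOFS =====

-- `linP l m`: l has (linear) block period m; what A's inner loop checks for each m.
def linP (l : List Char) (m : Nat) : Prop := ∀ j : Nat, j + m < l.length → l[j]? = l[j + m]?

-- `rotE l k`: l equals its cyclic rotation by k; what an occurrence of l at
-- offset k of l ++ l means (B's substring test).
def rotE (l : List Char) (k : Nat) : Prop :=
  ∀ i : Nat, i < l.length → l[(i + k) % l.length]? = l[i]?

theorem linP_of_rotE (l : List Char) (g : Nat) (h : rotE l g) : linP l g := by
  intro j hj
  have := h j (by omega)
  rwa [Nat.mod_eq_of_lt (by omega), eq_comm] at this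

theorem linP_iter (l : List Char) (m : Nat) (h : linP l m) :
    ∀ (t j : Nat), j + t * m < l.length → l[j]? = l[j + t * m]? := by
  intro t
  induction t with
  | zero => simp
  | succ t ih =>
    intro j hj
    have e : (t + 1) * m = t * m + m := by ring
    have h1 := ih j (by omega)
    have h2 := h (j + t * m) (by omega)
    rw [h1, h2]
    congr 1
    omega

theorem linP_congr (l : List Char) (m a b : Nat) (hm : 0 < m) (h : linP l m)
    (ha : a < l.length) (hb : b < l.length) (hab : a % m = b % m) :
    l[a]? = l[b]? := by
  rcases Nat.le_total a b with hle | hle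
  · obtain ⟨t, ht⟩ := (Nat.modEq_iff_dvd' hle).mp hab
    have e : m * t = t * m := Nat.mul_comm m t
    have hb' : b = a + t * m := by omega
    subst hb'
    exact linP_iter l m h t a (by omega)
  · obtain ⟨t, ht⟩ := (Nat.modEq_iff_dvd' hle).mp hab.symm
    have e : m * t = t * m := Nat.mul_comm m t
    have ha' : a = b + t * m := by omega
    subst ha'
    exact (linP_iter l m h t b (by omega)).symm

theorem rotE_of_linP (l : List Char) (m : Nat) (hm : 0 < m) (hdvd : m ∣ l.length)
    (h : linP l m) : rotE l m := by
  intro i hi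
  by_cases hc : i + m < l.length
  · rw [Nat.mod_eq_of_lt hc]
    exact (h i hc).symm
  · obtain ⟨c, hc'⟩ := hdvd
    have hmle : m ≤ l.length := Nat.le_of_dvd (by omega) ⟨c, hc'⟩
    have hmod : (i + m) % l.length = i + m - l.length := by
      rw [Nat.mod_eq_sub_mod (by omega), Nat.mod_eq_of_lt (by omega)]
    rw [hmod]
    refine linP_congr l m _ i hm h (by omega) hi ?_
    have e1 : (i + m - l.length + m * c) % m = (i + m - l.length) % m :=
      Nat.add_mul_mod_self_left _ _ _
    have e2 : i + m - l.length + m * c = i + m := by omega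
    have e3 : (i + m) % m = i % m := by
      have := Nat.add_mod_right i m
      omega
    rw [← e1, e2]
    exact e3

theorem rotE_iter (l : List Char) (k : Nat) (h : rotE l k) :
    ∀ (t i : Nat), i < l.length → l[(i + t * k) % l.length]? = l[i]? := by
  intro t
  induction t with
  | zero => intro i hi; simp [Nat.mod_eq_of_lt hi]
  | succ t ih =>
    intro i hi
    have hn : 0 < l.length := by omega
    have ha : (i + t * k) % l.length < l.length := Nat.mod_lt _ hn
    have h1 := h ((i + t * k) % l.length) ha
    have e4 : i + (t + 1) * k = (i + t * k) + k := by ring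
    rw [e4, ← Nat.mod_add_mod, h1, ih i hi]

theorem bezout_nat (k n : Nat) (hn : 0 < n) :
    ∃ t : Nat, (t * k) % n = (Nat.gcd k n) % n := by
  set a := Nat.gcdA k n with haa
  have hg : ((Nat.gcd k n : Int)) = k * a + n * (Nat.gcdB k n) := Nat.gcd_eq_gcd_ab k n
  have hmodnn : 0 ≤ a % (n : Int) := Int.emod_nonneg a (by exact_mod_cast hn.ne')
  refine ⟨(a % (n : Int)).toNat, ?_⟩
  have ht : (((a % (n : Int)).toNat : Int)) = a % n := Int.toNat_of_nonneg hmodnn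
  have key : ((((a % (n : Int)).toNat * k) % n : Nat) : Int) = (((Nat.gcd k n) % n : Nat) : Int) := by
    push_cast [ht]
    have e1 : (a % (n : Int)) * k % n = a * k % n := by
      rw [Int.mul_emod, Int.emod_emod_of_dvd a dvd_rfl, ← Int.mul_emod]
    rw [e1, hg, mul_comm (a : Int) (k : Int), Int.add_mul_emod_self_left]
  exact_mod_cast key

theorem rotE_gcd (l : List Char) (k : Nat) (hn : 0 < l.length) (h : rotE l k) :
    rotE l (Nat.gcd k l.length) := by
  obtain ⟨t, ht⟩ := bezout_nat k l.length hn
  intro i hi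
  have h2 := rotE_iter l k h t i hi
  have e : (i + Nat.gcd k l.length) % l.length = (i + t * k) % l.length := by
    rw [Nat.add_mod, Nat.add_mod i (t * k), ht]
  rw [e]
  exact h2

theorem getElem?_double (l : List Char) (k i : Nat) (hk : k < l.length) (hi : i < l.length) :
    (l ++ l)[k + i]? = l[(i + k) % l.length]? := by
  by_cases hc : k + i < l.length
  · rw [List.getElem?_append_left hc, Nat.mod_eq_of_lt (by omega)]
    congr 1
    omega
  · rw [List.getElem?_append_right (by omega), Nat.mod_eq_sub_mod (by omega),
      Nat.mod_eq_of_lt (by omega)]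
    congr 1
    omega

theorem prefix_drop_iff_rotE (l : List Char) (k : Nat) (hk : 1 ≤ k) (hkn : k < l.length) :
    (l <+: (l ++ l).drop k) ↔ rotE l k := by
  rw [List.prefix_iff_eq_take]
  constructor
  · intro heq i hi
    have := congrArg (fun t => t[i]?) heq
    simp only at this
    rw [List.getElem?_take_of_lt hi, List.getElem?_drop, getElem?_double l k i hkn hi] at this
    exact this.symm
  · intro hrot
    apply List.ext_getElem?
    intro i
    by_cases hi : i < l.length
    · rw [List.getElem?_take_of_lt hi, List.getElem?_drop, getElem?_double l k i hkn hi,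
        hrot i hi]
    · rw [List.getElem?_eq_none (by omega), eq_comm]
      apply List.getElem?_eq_none
      simp
      omega

theorem slice_eq_iff (l : List Char) (w m : Nat) (hw : w + 2 * m ≤ l.length) :
    (PySem.List.slice l (some (w : Int)) (some ((w : Int) + (m : Int))) =
      PySem.List.slice l (some ((w : Int) + (m : Int))) (some ((w : Int) + (m : Int) * 2)))
      ↔ ∀ r, r < m → l[w + r]? = l[w + m + r]? := by
  have e1 : PySem.List.slice l (some (w : Int)) (some ((w : Int) + (m : Int))) =
      (l.drop w).take m := PySem.List.slice_natCast_add l w m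
  have eb : ((w : Int) + (m : Int)) = (((w + m : Nat)) : Int) := by push_cast; ring
  have eb2 : ((w : Int) + (m : Int) * 2) = ((((w + m : Nat)) : Int) + ((m : Nat) : Int)) := by
    push_cast; ring
  have e2 : PySem.List.slice l (some ((w : Int) + (m : Int))) (some ((w : Int) + (m : Int) * 2)) =
      (l.drop (w + m)).take m := by
    rw [eb, eb2]; exact PySem.List.slice_natCast_add l (w + m) m
  rw [e1, e2]
  constructor
  · intro heq r hr
    have := congrArg (fun t => t[r]?) heq
    simp only at this
    rwa [List.getElem?_take_of_lt hr, List.getElem?_take_of_lt hr, List.getElem?_drop,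
      List.getElem?_drop] at this
  · intro h
    apply List.ext_getElem?
    intro r
    by_cases hr : r < m
    · rw [List.getElem?_take_of_lt hr, List.getElem?_take_of_lt hr, List.getElem?_drop,
        List.getElem?_drop]
      exact h r hr
    · rw [List.getElem?_eq_none, List.getElem?_eq_none] <;> simp <;> omega

theorem mult_bound (m a c : Nat) (h : m * a + m < m * c) : m * a + 2 * m ≤ m * c := by
  have hac : a + 2 ≤ c := by
    by_contra h'
    push_neg at h'
    have h2 := Nat.mul_le_mul_left m (show c ≤ a + 1 by omega)
    rw [Nat.mul_succ] at h2
    omega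
  have h3 := Nat.mul_le_mul_left m hac
  rw [Nat.left_distrib] at h3
  omega

theorem blockB_iff (l : List Char) (m : Nat) (hm : 0 < m) (hmlt : m < l.length)
    (hdvd : m ∣ l.length) :
    ((PySem.List.pyRange 0 ((l.length : Int) - (m : Int)) (m : Int)).all (fun i =>
        PySem.List.slice l (some i) (some (i + (m : Int))) ==
        PySem.List.slice l (some (i + (m : Int))) (some (i + (m : Int) * 2))) = true)
      ↔ linP l m := by
  rw [List.all_eq_true]
  have hmpos : (0 : Int) < (m : Int) := by exact_mod_cast hm
  obtain ⟨c, hc⟩ := hdvd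
  constructor
  · intro hall j hj
    set w := m * (j / m) with hwdef
    have hwle : w ≤ j := Nat.mul_div_le j m
    have hdm := Nat.mod_add_div j m
    have hmlt' := Nat.mod_lt j hm
    have hrlt : j - w < m := by omega
    have hmem : ((w : Int)) ∈ PySem.List.pyRange 0 ((l.length : Int) - (m : Int)) (m : Int) := by
      rw [PySem.List.mem_pyRange_iff_of_pos hmpos]
      refine ⟨by positivity, by push_cast; omega, ⟨(j / m : Nat), by push_cast [hwdef]; ring⟩⟩
    have hsl := hall _ hmem
    rw [beq_iff_eq] at hsl
    have h2m : w + 2 * m ≤ l.length := by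
      have := mult_bound m (j / m) c (by omega)
      omega
    have hpt := (slice_eq_iff l w m h2m).mp hsl (j - w) hrlt
    have e : w + (j - w) = j := by omega
    have e2 : w + m + (j - w) = j + m := by omega
    rwa [e, e2] at hpt
  · intro hlin i hmem
    rw [PySem.List.mem_pyRange_iff_of_pos hmpos] at hmem
    obtain ⟨h0, hlt, hdv⟩ := hmem
    lift i to ℕ using h0 with w
    rw [beq_iff_eq]
    rw [sub_zero] at hdv
    obtain ⟨a, ha⟩ : m ∣ w := by exact_mod_cast hdv
    have hlt' : w + m < l.length := by
      have : (w : Int) + m < l.length := by omega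
      exact_mod_cast this
    have h2m : w + 2 * m ≤ l.length := by
      have := mult_bound m a c (by omega)
      omega
    refine (slice_eq_iff l w m h2m).mpr ?_
    intro r hr
    have hl2 := hlin (w + r) (by omega)
    have e : w + r + m = w + m + r := by omega
    rwa [e] at hl2

theorem a_iff_2 (id : String) (hn : id.toList.length = 2) :
    is_invalid_part2 id = true ↔
      ∃ m, 0 < m ∧ m < id.toList.length ∧ m ∣ id.toList.length ∧ linP id.toList m := by
  unfold is_invalid_part2
  simp only [hn]
  norm_num
  rw [show num_map.get? 2 = some [1] from rfl]
  have B1 := blockB_iff id.toList 1 (by norm_num) (by omega) (by rw [hn]; norm_num)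
  norm_num [hn] at B1
  simp only [List.any_cons, List.any_nil, Bool.or_eq_true, Bool.false_eq_true, or_false]
  norm_num
  rw [B1]
  constructor
  · intro h
    exact ⟨1, by norm_num, by omega, by norm_num, h⟩
  · rintro ⟨m, hm0, hmlt, hdvd, h⟩
    interval_cases m <;>
      first | exact h | exact Or.inl h | exact Or.inr h | exact Or.inr (Or.inl h) |
        exact Or.inr (Or.inr h) | omega

theorem a_iff_3 (id : String) (hn : id.toList.length = 3) :
    is_invalid_part2 id = true ↔
      ∃ m, 0 < m ∧ m < id.toList.length ∧ m ∣ id.toList.length ∧ linP id.toList m := by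
  unfold is_invalid_part2
  simp only [hn]
  norm_num
  rw [show num_map.get? 3 = some [1] from rfl]
  have B1 := blockB_iff id.toList 1 (by norm_num) (by omega) (by rw [hn]; norm_num)
  norm_num [hn] at B1
  simp only [List.any_cons, List.any_nil, Bool.or_eq_true, Bool.false_eq_true, or_false]
  norm_num
  rw [B1]
  constructor
  · intro h
    exact ⟨1, by norm_num, by omega, by norm_num, h⟩
  · rintro ⟨m, hm0, hmlt, hdvd, h⟩
    interval_cases m <;>
      first | exact h | exact Or.inl h | exact Or.inr h | exact Or.inr (Or.inl h) |
        exact Or.inr (Or.inr h) | omega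

theorem a_iff_4 (id : String) (hn : id.toList.length = 4) :
    is_invalid_part2 id = true ↔
      ∃ m, 0 < m ∧ m < id.toList.length ∧ m ∣ id.toList.length ∧ linP id.toList m := by
  unfold is_invalid_part2
  simp only [hn]
  norm_num
  rw [show num_map.get? 4 = some [1,2] from rfl]
  have B1 := blockB_iff id.toList 1 (by norm_num) (by omega) (by rw [hn]; norm_num)
  have B2 := blockB_iff id.toList 2 (by norm_num) (by omega) (by rw [hn]; norm_num)
  norm_num [hn] at B1 B2
  simp only [List.any_cons, List.any_nil, Bool.or_eq_true, Bool.false_eq_true, or_false]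
  norm_num
  rw [B1, B2]
  constructor
  · rintro (h | h)
    · exact ⟨1, by norm_num, by omega, by norm_num, h⟩
    · exact ⟨2, by norm_num, by omega, by norm_num, h⟩
  · rintro ⟨m, hm0, hmlt, hdvd, h⟩
    interval_cases m <;>
      first | exact h | exact Or.inl h | exact Or.inr h | exact Or.inr (Or.inl h) |
        exact Or.inr (Or.inr h) | omega

theorem a_iff_5 (id : String) (hn : id.toList.length = 5) :
    is_invalid_part2 id = true ↔
      ∃ m, 0 < m ∧ m < id.toList.length ∧ m ∣ id.toList.length ∧ linP id.toList m := by
  unfold is_invalid_part2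
  simp only [hn]
  norm_num
  rw [show num_map.get? 5 = some [1] from rfl]
  have B1 := blockB_iff id.toList 1 (by norm_num) (by omega) (by rw [hn]; norm_num)
  norm_num [hn] at B1
  simp only [List.any_cons, List.any_nil, Bool.or_eq_true, Bool.false_eq_true, or_false]
  norm_num
  rw [B1]
  constructor
  · intro h
    exact ⟨1, by norm_num, by omega, by norm_num, h⟩
  · rintro ⟨m, hm0, hmlt, hdvd, h⟩
    interval_cases m <;>
      first | exact h | exact Or.inl h | exact Or.inr h | exact Or.inr (Or.inl h) |
        exact Or.inr (Or.inr h) | omega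

theorem a_iff_6 (id : String) (hn : id.toList.length = 6) :
    is_invalid_part2 id = true ↔
      ∃ m, 0 < m ∧ m < id.toList.length ∧ m ∣ id.toList.length ∧ linP id.toList m := by
  unfold is_invalid_part2
  simp only [hn]
  norm_num
  rw [show num_map.get? 6 = some [1,2,3] from rfl]
  have B1 := blockB_iff id.toList 1 (by norm_num) (by omega) (by rw [hn]; norm_num)
  have B2 := blockB_iff id.toList 2 (by norm_num) (by omega) (by rw [hn]; norm_num)
  have B3 := blockB_iff id.toList 3 (by norm_num) (by omega) (by rw [hn]; norm_num)
  norm_num [hn] at B1 B2 B3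
  simp only [List.any_cons, List.any_nil, Bool.or_eq_true, Bool.false_eq_true, or_false]
  norm_num
  rw [B1, B2, B3]
  constructor
  · rintro (h | h | h)
    · exact ⟨1, by norm_num, by omega, by norm_num, h⟩
    · exact ⟨2, by norm_num, by omega, by norm_num, h⟩
    · exact ⟨3, by norm_num, by omega, by norm_num, h⟩
  · rintro ⟨m, hm0, hmlt, hdvd, h⟩
    interval_cases m <;>
      first | exact h | exact Or.inl h | exact Or.inr h | exact Or.inr (Or.inl h) |
        exact Or.inr (Or.inr h) | omega

theorem a_iff_7 (id : String) (hn : id.toList.length = 7) :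
    is_invalid_part2 id = true ↔
      ∃ m, 0 < m ∧ m < id.toList.length ∧ m ∣ id.toList.length ∧ linP id.toList m := by
  unfold is_invalid_part2
  simp only [hn]
  norm_num
  rw [show num_map.get? 7 = some [1] from rfl]
  have B1 := blockB_iff id.toList 1 (by norm_num) (by omega) (by rw [hn]; norm_num)
  norm_num [hn] at B1
  simp only [List.any_cons, List.any_nil, Bool.or_eq_true, Bool.false_eq_true, or_false]
  norm_num
  rw [B1]
  constructor
  · intro h
    exact ⟨1, by norm_num, by omega, by norm_num, h⟩
  · rintro ⟨m, hm0, hmlt, hdvd, h⟩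
    interval_cases m <;>
      first | exact h | exact Or.inl h | exact Or.inr h | exact Or.inr (Or.inl h) |
        exact Or.inr (Or.inr h) | omega

theorem a_iff_8 (id : String) (hn : id.toList.length = 8) :
    is_invalid_part2 id = true ↔
      ∃ m, 0 < m ∧ m < id.toList.length ∧ m ∣ id.toList.length ∧ linP id.toList m := by
  unfold is_invalid_part2
  simp only [hn]
  norm_num
  rw [show num_map.get? 8 = some [1,2,4] from rfl]
  have B1 := blockB_iff id.toList 1 (by norm_num) (by omega) (by rw [hn]; norm_num)
  have B2 := blockB_iff id.toList 2 (by norm_num) (by omega) (by rw [hn]; norm_num)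
  have B4 := blockB_iff id.toList 4 (by norm_num) (by omega) (by rw [hn]; norm_num)
  norm_num [hn] at B1 B2 B4
  simp only [List.any_cons, List.any_nil, Bool.or_eq_true, Bool.false_eq_true, or_false]
  norm_num
  rw [B1, B2, B4]
  constructor
  · rintro (h | h | h)
    · exact ⟨1, by norm_num, by omega, by norm_num, h⟩
    · exact ⟨2, by norm_num, by omega, by norm_num, h⟩
    · exact ⟨4, by norm_num, by omega, by norm_num, h⟩
  · rintro ⟨m, hm0, hmlt, hdvd, h⟩
    interval_cases m <;>
      first | exact h | exact Or.inl h | exact Or.inr h | exact Or.inr (Or.inl h) |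
        exact Or.inr (Or.inr h) | omega

theorem a_iff_9 (id : String) (hn : id.toList.length = 9) :
    is_invalid_part2 id = true ↔
      ∃ m, 0 < m ∧ m < id.toList.length ∧ m ∣ id.toList.length ∧ linP id.toList m := by
  unfold is_invalid_part2
  simp only [hn]
  norm_num
  rw [show num_map.get? 9 = some [1,3] from rfl]
  have B1 := blockB_iff id.toList 1 (by norm_num) (by omega) (by rw [hn]; norm_num)
  have B3 := blockB_iff id.toList 3 (by norm_num) (by omega) (by rw [hn]; norm_num)
  norm_num [hn] at B1 B3
  simp only [List.any_cons, List.any_nil, Bool.or_eq_true, Bool.false_eq_true, or_false]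
  norm_num
  rw [B1, B3]
  constructor
  · rintro (h | h)
    · exact ⟨1, by norm_num, by omega, by norm_num, h⟩
    · exact ⟨3, by norm_num, by omega, by norm_num, h⟩
  · rintro ⟨m, hm0, hmlt, hdvd, h⟩
    interval_cases m <;>
      first | exact h | exact Or.inl h | exact Or.inr h | exact Or.inr (Or.inl h) |
        exact Or.inr (Or.inr h) | omega

theorem a_iff_10 (id : String) (hn : id.toList.length = 10) :
    is_invalid_part2 id = true ↔
      ∃ m, 0 < m ∧ m < id.toList.length ∧ m ∣ id.toList.length ∧ linP id.toList m := by
  unfold is_invalid_part2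
  simp only [hn]
  norm_num
  rw [show num_map.get? 10 = some [1,2,5] from rfl]
  have B1 := blockB_iff id.toList 1 (by norm_num) (by omega) (by rw [hn]; norm_num)
  have B2 := blockB_iff id.toList 2 (by norm_num) (by omega) (by rw [hn]; norm_num)
  have B5 := blockB_iff id.toList 5 (by norm_num) (by omega) (by rw [hn]; norm_num)
  norm_num [hn] at B1 B2 B5
  simp only [List.any_cons, List.any_nil, Bool.or_eq_true, Bool.false_eq_true, or_false]
  norm_num
  rw [B1, B2, B5]
  constructor
  · rintro (h | h | h)
    · exact ⟨1, by norm_num, by omega, by norm_num, h⟩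
    · exact ⟨2, by norm_num, by omega, by norm_num, h⟩
    · exact ⟨5, by norm_num, by omega, by norm_num, h⟩
  · rintro ⟨m, hm0, hmlt, hdvd, h⟩
    interval_cases m <;>
      first | exact h | exact Or.inl h | exact Or.inr h | exact Or.inr (Or.inl h) |
        exact Or.inr (Or.inr h) | omega

theorem a_iff (id : String) (h2 : 2 ≤ id.toList.length) (h10 : id.toList.length ≤ 10) :
    is_invalid_part2 id = true ↔
      ∃ m, 0 < m ∧ m < id.toList.length ∧ m ∣ id.toList.length ∧ linP id.toList m := by
  have hc : id.toList.length = 2 ∨ id.toList.length = 3 ∨ id.toList.length = 4 ∨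
      id.toList.length = 5 ∨ id.toList.length = 6 ∨ id.toList.length = 7 ∨
      id.toList.length = 8 ∨ id.toList.length = 9 ∨ id.toList.length = 10 := by omega
  rcases hc with h|h|h|h|h|h|h|h|h
  · exact a_iff_2 id h
  · exact a_iff_3 id h
  · exact a_iff_4 id h
  · exact a_iff_5 id h
  · exact a_iff_6 id h
  · exact a_iff_7 id h
  · exact a_iff_8 id h
  · exact a_iff_9 id h
  · exact a_iff_10 id h

-- The slice (l ++ l)[1:-1] computed as drop/take.
theorem slice_double (l : List Char) (hn : 1 ≤ l.length) :
    PySem.Chars.slice (l ++ l) (some 1) (some (-1)) =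
      ((l ++ l).drop 1).take (2 * l.length - 2) := by
  simp [PySem.List.slice, PySem.List.clampIdx]
  rw [if_neg (by omega), min_eq_left (by omega), ← List.drop_one]
  congr 1
  omega

-- B is true iff l matches one of its nontrivial rotations.
theorem alt_iff (id : String) (hn : 1 ≤ id.toList.length) :
    is_invalid_part2_alt id = true ↔
      ∃ k, 1 ≤ k ∧ k < id.toList.length ∧ rotE id.toList k := by
  unfold is_invalid_part2_alt
  simp only []
  set l := id.toList with hl
  rw [slice_double l hn, ← PySem.Chars.exists_prefix_drop_iff_isIn]
  constructor
  · rintro ⟨j, hj⟩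
    rw [List.drop_take, List.drop_drop] at hj
    have hlen := hj.length_le
    simp at hlen
    refine ⟨1 + j, by omega, by omega, (prefix_drop_iff_rotE l (1 + j) (by omega) (by omega)).mp ?_⟩
    exact (List.prefix_take_iff.mp hj).1
  · rintro ⟨k, hk1, hkn, hrot⟩
    refine ⟨k - 1, ?_⟩
    rw [List.drop_take, List.drop_drop]
    have e : 1 + (k - 1) = k := by omega
    rw [e, List.prefix_take_iff]
    exact ⟨(prefix_drop_iff_rotE l k hk1 hkn).mpr hrot, by omega⟩

theorem core_iff (l : List Char) (h2 : 2 ≤ l.length) :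
    (∃ m, 0 < m ∧ m < l.length ∧ m ∣ l.length ∧ linP l m) ↔
      (∃ k, 1 ≤ k ∧ k < l.length ∧ rotE l k) := by
  constructor
  · rintro ⟨m, hm, hmlt, hdvd, h⟩
    exact ⟨m, hm, hmlt, rotE_of_linP l m hm hdvd h⟩
  · rintro ⟨k, hk, hkn, h⟩
    refine ⟨Nat.gcd k l.length, Nat.gcd_pos_of_pos_right _ (by omega), ?_, Nat.gcd_dvd_right _ _,
      linP_of_rotE l _ (rotE_gcd l k (by omega) h)⟩
    exact lt_of_le_of_lt (Nat.gcd_le_left _ (by omega)) hkn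

-- ===== VERDICT (by name: the statement is the Claim_ definition above) =====
theorem is_invalid_part2_spec : Claim_equal_is_invalid_part2 := by
  intro id _ hpre
  unfold Spec_is_invalid_part2
  obtain ⟨h1, h10⟩ := hpre
  by_cases h2 : 2 ≤ id.toList.length
  · rw [Bool.eq_iff_iff, a_iff id h2 h10, alt_iff id h1, core_iff id.toList h2]
  · -- length 1: A's guard returns False, and no k with 1 ≤ k < 1 exists
    have hlen : id.toList.length = 1 := by omega
    have hb : is_invalid_part2_alt id = false := by
      rcases hB : is_invalid_part2_alt id
      · rfl
      · obtain ⟨k, hk, hkn, -⟩ := (alt_iff id h1).mp hB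
        omega
    have ha : is_invalid_part2 id = false := by
      unfold is_invalid_part2
      simp [hlen]
    rw [ha, hb]
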